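-- pv_equiv track=rewrite | github.com/pbanavara/gemma-fine-tune | unsloth-fine-tune.py | fix_conversation
-- ===== SOURCE A (Python) =====
-- def fix_conversation(convo):
--     """Remap system→user so the conversation starts with user/assistant alternation.
--     Required because coordinators initiate calls (system→assistant→user...), but
--     the Gemma-4 template enforces strict user/assistant alternation after any system message."""
--     fixed = []
--     for msg in convo:
--         role = msg.get("role", "")
--         if role == "system":
--             role = "user"
--         content = msg.get("content", "")
--         if fixed and fixed[-1]["role"] == role:
--             fixed[-1]["content"] += "\n" + content
--         else:
--             fixed.append({"role": role, "content": content})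
--     while fixed and fixed[0]["role"] != "user":
--         fixed.pop(0)
--     return fixed
-- ===== SOURCE B (Python) =====
-- def fix_conversation(convo):
--     # Pass 1: normalize each message to a (role, content) pair (system -> user).
--     msgs = [("user" if m.get("role", "") == "system" else m.get("role", ""),
--              m.get("content", "")) for m in convo]
--     # Pass 2: split into maximal runs of equal role; one dict per run.
--     groups = []
--     rest = msgs
--     while rest:
--         role = rest[0][0]
--         i = 1
--         while i < len(rest) and rest[i][0] == role:
--             i += 1
--         content = rest[0][1]
--         for _, c in rest[1:i]:
--             content += "\n" + c
--         groups.append({"role": role, "content": content})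
--         rest = rest[i:]
--     # Pass 3: drop leading groups whose role is not "user".
--     j = 0
--     while j < len(groups) and groups[j]["role"] != "user":
--         j += 1
--     return groups[j:]
-- ===== Notes on version B (the rewrite author's own statement) =====
-- stated objective: alternative
-- what changed: Replaces A's single mutating fold (append-or-extend the last dict, then pop leading non-user dicts) by a three-stage pipeline: normalize all messages to (role, content) pairs, group consecutive equal-role runs by run-length scanning over a shrinking suffix, then drop leading non-user groups by an index scan.
import Mathlib
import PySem

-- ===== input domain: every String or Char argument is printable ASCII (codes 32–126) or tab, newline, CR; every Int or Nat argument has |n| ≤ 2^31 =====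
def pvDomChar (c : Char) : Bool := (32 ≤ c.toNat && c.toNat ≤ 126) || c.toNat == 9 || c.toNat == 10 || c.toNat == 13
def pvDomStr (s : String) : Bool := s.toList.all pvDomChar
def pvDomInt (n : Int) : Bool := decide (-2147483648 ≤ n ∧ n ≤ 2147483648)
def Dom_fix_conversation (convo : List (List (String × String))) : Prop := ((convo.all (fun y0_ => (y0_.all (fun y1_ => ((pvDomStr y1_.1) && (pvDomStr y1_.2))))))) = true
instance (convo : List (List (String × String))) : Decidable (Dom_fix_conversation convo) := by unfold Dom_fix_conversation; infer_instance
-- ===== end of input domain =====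

-- B groups consecutive equal-role runs in three passes instead of A's mutating fold; alternative decomposition, same cost.
-- Messages and results are dicts with String values, ported as association lists; m.get(k, "") is first-match lookup
-- with default "" (List.lookup), exact for dicts.

-- ===== PORT A =====
-- fixed[-1]["content"] += "\n" + content : update the existing "content" entry in place (position kept)
def pvBump (d : List (String × String)) (content : String) : List (String × String) :=
  d.map (fun kv => if kv.1 == "content" then (kv.1, kv.2 ++ "\n" ++ content) else kv)

-- one iteration of A's for-loop body
def pvStep (fixed : List (List (String × String))) (msg : List (String × String)) :
    List (List (String × String)) :=
  let role0 := (msg.lookup "role").getD ""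
  let role := if role0 == "system" then "user" else role0
  let content := (msg.lookup "content").getD ""
  match fixed.getLast? with
  | some last =>
      if (last.lookup "role").getD "" == role then
        fixed.dropLast ++ [pvBump last content]
      else
        fixed ++ [[("role", role), ("content", content)]]
  | none => fixed ++ [[("role", role), ("content", content)]]

-- the trailing while...pop(0) loop
def pvPop : List (List (String × String)) → List (List (String × String))
  | [] => []
  | d :: rest => if (d.lookup "role").getD "" != "user" then pvPop rest else d :: rest

def fix_conversation (convo : List (List (String × String))) : List (List (String × String)) :=
  pvPop (convo.foldl pvStep [])

-- ===== PORT B =====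
-- pass 1: normalize one message to a (role, content) pair
def pvNorm (m : List (String × String)) : String × String :=
  let role := (m.lookup "role").getD ""
  ((if role == "system" then "user" else role), (m.lookup "content").getD "")

-- pass 2: the outer while-loop over the shrinking suffix `rest`; the inner index scan counting
-- equal-role successors is the takeWhile length, and the content loop folds over that run
def pvGroup : List (String × String) → List (List (String × String))
  | [] => []
  | (r, c) :: rest =>
      let run := rest.takeWhile (fun p => p.1 == r)
      let content := run.foldl (fun acc p => acc ++ "\n" ++ p.2) c
      [("role", r), ("content", content)] :: pvGroup (rest.drop run.length)
termination_by ps => ps.length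
decreasing_by simp

def fix_conversation_alt (convo : List (List (String × String))) : List (List (String × String)) :=
  -- pass 3: the index scan j + slice groups[j:] is exactly dropWhile
  (pvGroup (convo.map pvNorm)).dropWhile (fun d => (d.lookup "role").getD "" != "user")

-- ===== PRECONDITION & SPEC =====
def Spec_fix_conversation (convo : List (List (String × String))) (out : List (List (String × String))) : Prop := out = fix_conversation_alt convo
instance (convo : List (List (String × String))) (out : List (List (String × String))) : Decidable (Spec_fix_conversation convo out) := by unfold Spec_fix_conversation; infer_instance

-- ===== CLAIM (what is proved, stated in full; the proofs are below) =====
def Claim_equal_fix_conversation : Prop := ∀ (convo : List (List (String × String))), Dom_fix_conversation convo → Spec_fix_conversation convo (fix_conversation convo)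

-- ===== LEMMAS AND PROOFS =====

theorem pvGroup_nil : pvGroup [] = [] := by rw [pvGroup]

theorem pvGroup_cons (r c : String) (rest : List (String × String)) :
    pvGroup ((r, c) :: rest) =
      [("role", r),
       ("content", (rest.takeWhile (fun p => p.1 == r)).foldl (fun acc p => acc ++ "\n" ++ p.2) c)]
        :: pvGroup (rest.drop (rest.takeWhile (fun p => p.1 == r)).length) := by
  rw [pvGroup]

-- A's step, restated on an already-normalized (role, content) pair
def pvStepP (fixed : List (List (String × String))) (p : String × String) :
    List (List (String × String)) :=
  match fixed.getLast? with
  | some last =>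
      if (last.lookup "role").getD "" == p.1 then
        fixed.dropLast ++ [pvBump last p.2]
      else fixed ++ [[("role", p.1), ("content", p.2)]]
  | none => fixed ++ [[("role", p.1), ("content", p.2)]]

theorem pvStep_eq (fixed : List (List (String × String))) (m : List (String × String)) :
    pvStep fixed m = pvStepP fixed (pvNorm m) := rfl

-- A's accumulation on normalized pairs, with the open run carried as (r, c)
def pvGroupFrom (r c : String) : List (String × String) → List (List (String × String))
  | [] => [[("role", r), ("content", c)]]
  | (r', c') :: rest =>
      if r' == r then pvGroupFrom r (c ++ "\n" ++ c') rest
      else [("role", r), ("content", c)] :: pvGroupFrom r' c' rest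

theorem pvBump_mk (r c x : String) :
    pvBump [("role", r), ("content", c)] x = [("role", r), ("content", c ++ "\n" ++ x)] := by
  simp [pvBump]

theorem pvStepP_last (gs : List (List (String × String))) (r c : String) (p : String × String) :
    pvStepP (gs ++ [[("role", r), ("content", c)]]) p =
      if p.1 == r then gs ++ [[("role", r), ("content", c ++ "\n" ++ p.2)]]
      else (gs ++ [[("role", r), ("content", c)]]) ++ [[("role", p.1), ("content", p.2)]] := by
  simp only [pvStepP, List.getLast?_append, List.getLast?_singleton, Option.some_or]
  have hl : (([("role", r), ("content", c)] : List (String × String)).lookup "role").getD "" = r := by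
    simp [List.lookup]
  rw [hl]
  by_cases h : p.1 = r
  · rw [if_pos (by simp [h]), if_pos (by simp [h])]
    simp [pvBump_mk]
  · rw [if_neg (by simpa using Ne.symm h), if_neg (by simpa using h)]

theorem pvFoldl_from (ps : List (String × String)) :
    ∀ (gs : List (List (String × String))) (r c : String),
      List.foldl pvStepP (gs ++ [[("role", r), ("content", c)]]) ps = gs ++ pvGroupFrom r c ps := by
  induction ps with
  | nil => intro gs r c; simp [pvGroupFrom]
  | cons p rest ih =>
      intro gs r c
      obtain ⟨r', c'⟩ := p
      rw [List.foldl_cons, pvStepP_last, pvGroupFrom]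
      by_cases h : r' = r
      · rw [if_pos (by simp [h]), if_pos (by simp [h]), ih]
      · rw [if_neg (by simp [h]), if_neg (by simp [h]), ih, List.append_assoc]
        rfl

theorem pvGroupFrom_eq (ps : List (String × String)) :
    ∀ (r c : String), pvGroupFrom r c ps = pvGroup ((r, c) :: ps) := by
  induction ps with
  | nil => intro r c; rw [pvGroup_cons]; simp [pvGroupFrom, pvGroup_nil]
  | cons p rest ih =>
      intro r c
      obtain ⟨r', c'⟩ := p
      by_cases h : r' = r
      · subst h
        rw [pvGroupFrom, if_pos (by simp), ih, pvGroup_cons, pvGroup_cons]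
        simp
      · rw [pvGroupFrom, if_neg (by simp [h]), ih]
        conv_rhs => rw [pvGroup_cons]
        rw [List.takeWhile_cons, if_neg (by simp [h])]
        simp

theorem pvPop_eq_dropWhile (xs : List (List (String × String))) :
    pvPop xs = xs.dropWhile (fun d => (d.lookup "role").getD "" != "user") := by
  induction xs with
  | nil => rfl
  | cons d rest ih =>
      rw [pvPop, List.dropWhile]
      split_ifs with h
      · simp only [h]; exact ih
      · simp [h]

theorem fix_conversation_spec : Claim_equal_fix_conversation := by
  intro convo _
  unfold Spec_fix_conversation fix_conversation fix_conversation_alt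
  have hmap : convo.foldl pvStep [] = (convo.map pvNorm).foldl pvStepP [] := by
    rw [List.foldl_map]
    simp only [← pvStep_eq]
  rw [hmap, pvPop_eq_dropWhile]
  congr 1
  cases hps : convo.map pvNorm with
  | nil => simp [pvGroup_nil]
  | cons p rest =>
      obtain ⟨r, c⟩ := p
      have h1 : pvStepP [] (r, c) = [[("role", r), ("content", c)]] := rfl
      rw [List.foldl_cons, h1]
      have := pvFoldl_from rest [] r c
      rw [show ([[("role", r), ("content", c)]] : List (List (String × String))) =
            [] ++ [[("role", r), ("content", c)]] from rfl, this, pvGroupFrom_eq]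
      simp
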